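-- pv_equiv track=rewrite | github.com/aleksandr-kramer/mojo_reports | src/reports/coordinator_weekly_report.py | make_per_slide_mappings_weekly_att
-- ===== SOURCE A (Python) =====
-- from typing import Dict, List, Optional, Tuple
--
-- def chunk(lst: List, size: int) -> List[List]:
--     return [lst[i : i + size] for i in range(0, len(lst), size)]
--
-- def make_per_slide_mappings_weekly_att(
--     header: Dict[str, str],
--     rows: List[tuple[str, str, str, str]],
--     per_slide_max: int,
-- ) -> List[Dict[str, Optional[str]]]:
--     mappings = []
--     for pack in chunk(rows, per_slide_max) or [[]]:
--         m = dict(header)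
--         for idx in range(1, per_slide_max + 1):
--             if idx <= len(pack):
--                 teacher, a, b, c = pack[idx - 1]
--                 m[f"teacher_{idx}"] = teacher
--                 m[f"A{idx}"] = a
--                 m[f"B{idx}"] = b
--                 m[f"C{idx}"] = c
--             else:
--                 m[f"teacher_{idx}"] = None
--                 m[f"A{idx}"] = None
--                 m[f"B{idx}"] = None
--                 m[f"C{idx}"] = None
--         mappings.append(m)
--     return mappings
-- ===== SOURCE B (Python) =====
-- from typing import Dict, List, Optional
--
--
-- def make_per_slide_mappings_weekly_att(
--     header: Dict[str, str],
--     rows: List[tuple[str, str, str, str]],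
--     per_slide_max: int,
-- ) -> List[Dict[str, Optional[str]]]:
--     # Chunk by repeatedly slicing off the front (instead of index arithmetic).
--     chunks: List[list] = []
--     if per_slide_max > 0:
--         rest = list(rows)
--         while rest:
--             chunks.append(rest[:per_slide_max])
--             rest = rest[per_slide_max:]
--     if not chunks:
--         chunks = [[]]
--     # Pad each chunk to per_slide_max and fill branch-free.
--     out = []
--     for ch in chunks:
--         padded = ch + [(None, None, None, None)] * (per_slide_max - len(ch))
--         m = dict(header)
--         for idx, (teacher, a, b, c) in enumerate(padded, 1):
--             m[f"teacher_{idx}"] = teacher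
--             m[f"A{idx}"] = a
--             m[f"B{idx}"] = b
--             m[f"C{idx}"] = c
--         out.append(m)
--     return out
-- ===== Notes on version B (the rewrite author's own statement) =====
-- stated objective: alternative
-- what changed: Chunking by index arithmetic over range(0, len, size) with slices is replaced by a while loop repeatedly slicing off the front, and A's per-index if/else fill is replaced by padding each chunk to per_slide_max with (None, None, None, None) rows and one branch-free enumerate pass.
import Mathlib
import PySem

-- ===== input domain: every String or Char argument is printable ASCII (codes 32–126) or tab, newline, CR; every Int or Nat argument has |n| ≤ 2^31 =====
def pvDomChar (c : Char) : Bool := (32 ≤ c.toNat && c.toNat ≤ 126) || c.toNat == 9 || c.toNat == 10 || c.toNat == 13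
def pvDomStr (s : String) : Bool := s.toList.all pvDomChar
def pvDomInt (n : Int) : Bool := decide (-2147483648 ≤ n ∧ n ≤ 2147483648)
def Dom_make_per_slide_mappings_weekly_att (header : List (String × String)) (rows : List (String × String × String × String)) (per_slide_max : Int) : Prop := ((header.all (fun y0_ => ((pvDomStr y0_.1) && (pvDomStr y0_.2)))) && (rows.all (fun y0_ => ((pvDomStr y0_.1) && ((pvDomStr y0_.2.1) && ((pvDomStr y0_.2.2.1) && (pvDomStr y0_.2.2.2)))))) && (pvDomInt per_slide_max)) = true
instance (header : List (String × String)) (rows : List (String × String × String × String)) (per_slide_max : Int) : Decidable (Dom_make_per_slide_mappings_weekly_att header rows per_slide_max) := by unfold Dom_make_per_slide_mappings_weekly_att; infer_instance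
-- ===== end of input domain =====

-- B restructures A: chunking by repeated front-slicing instead of index arithmetic, and a
-- branch-free pad-then-fill pass per slide instead of A's if/else over indices (objective: alternative).


-- ===== PORT A =====
def make_per_slide_mappings_weekly_att (header : List (String × String)) (rows : List (String × String × String × String)) (per_slide_max : Int) : List (List (String × Option String)) :=
  -- chunk(rows, per_slide_max): [rows[i : i + size] for i in range(0, len(rows), size)]
  let chunks := (PySem.List.pyRange 0 (rows.length : Int) per_slide_max).map
      (fun i => PySem.List.slice rows (some i) (some (i + per_slide_max)))
  -- `chunk(...) or [[]]`
  let packs := if chunks = [] then [([] : List (String × String × String × String))] else chunks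
  packs.foldl (fun mappings pack =>
    mappings ++ [((PySem.List.pyRange 1 (per_slide_max + 1) 1).foldl (fun m idx =>
        if idx ≤ (pack.length : Int) then
          match PySem.List.pyGet? pack (idx - 1) with
          | some (teacher, a, b, c) =>
              ((((m.insert ("teacher_" ++ PySem.Int.toStr idx) (some teacher)).insert
                  ("A" ++ PySem.Int.toStr idx) (some a)).insert
                  ("B" ++ PySem.Int.toStr idx) (some b)).insert
                  ("C" ++ PySem.Int.toStr idx) (some c))
          | none => m   -- unreachable: idx ≤ len(pack) guards the access
        else
          ((((m.insert ("teacher_" ++ PySem.Int.toStr idx) none).insert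
              ("A" ++ PySem.Int.toStr idx) none).insert
              ("B" ++ PySem.Int.toStr idx) none).insert
              ("C" ++ PySem.Int.toStr idx) none))
        (PySem.Dict.ofList (header.map (fun p => (p.1, some p.2))))).items]) []

-- ===== PORT B =====
-- while rest: chunks.append(rest[:per_slide_max]); rest = rest[per_slide_max:]
-- (only entered when per_slide_max > 0; t = per_slide_max - 1, so the slice width is t+1)
def pvChunksB {α : Type} (t : Nat) : List α → List (List α)
  | [] => []
  | x :: xs => (x :: xs).take (t + 1) :: pvChunksB t ((x :: xs).drop (t + 1))
  termination_by l => l.length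
  decreasing_by simp

-- for idx, (teacher, a, b, c) in enumerate(padded, 1): m[...] = ...
def pvFillB : Int → List (Option String × Option String × Option String × Option String) → PySem.Dict String (Option String) → PySem.Dict String (Option String)
  | _, [], m => m
  | idx, (teacher, a, b, c) :: rest, m =>
      pvFillB (idx + 1) rest
        ((((m.insert ("teacher_" ++ PySem.Int.toStr idx) teacher).insert
            ("A" ++ PySem.Int.toStr idx) a).insert
            ("B" ++ PySem.Int.toStr idx) b).insert
            ("C" ++ PySem.Int.toStr idx) c)

def make_per_slide_mappings_weekly_att_alt (header : List (String × String)) (rows : List (String × String × String × String)) (per_slide_max : Int) : List (List (String × Option String)) :=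
  let chunks := if 1 ≤ per_slide_max then pvChunksB (per_slide_max - 1).toNat rows else []
  let packs := if chunks = [] then [([] : List (String × String × String × String))] else chunks
  packs.foldl (fun out ch =>
    let padded := ch.map (fun r => ((some r.1 : Option String), (some r.2.1 : Option String), (some r.2.2.1 : Option String), (some r.2.2.2 : Option String)))
        ++ List.replicate (per_slide_max - (ch.length : Int)).toNat
            ((none : Option String), (none : Option String), (none : Option String), (none : Option String))
    out ++ [(pvFillB 1 padded (PySem.Dict.ofList (header.map (fun p => (p.1, some p.2))))).items]) []

-- ===== PRECONDITION & SPEC =====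
-- Python A raises ValueError (range() step must not be zero) iff per_slide_max = 0.
def Pre_make_per_slide_mappings_weekly_att (header : List (String × String)) (rows : List (String × String × String × String)) (per_slide_max : Int) : Prop := per_slide_max ≠ 0
instance (header : List (String × String)) (rows : List (String × String × String × String)) (per_slide_max : Int) : Decidable (Pre_make_per_slide_mappings_weekly_att header rows per_slide_max) := by unfold Pre_make_per_slide_mappings_weekly_att; infer_instance

def pvWitness_make_per_slide_mappings_weekly_att : (List (String × String)) × (List (String × String × String × String)) × Int :=
  ([("title", "Week 1")], [("Ms Ada", "1", "2", "3")], 2)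

def Spec_make_per_slide_mappings_weekly_att (header : List (String × String)) (rows : List (String × String × String × String)) (per_slide_max : Int) (out : List (List (String × Option String))) : Prop := out = make_per_slide_mappings_weekly_att_alt header rows per_slide_max
instance (header : List (String × String)) (rows : List (String × String × String × String)) (per_slide_max : Int) (out : List (List (String × Option String))) : Decidable (Spec_make_per_slide_mappings_weekly_att header rows per_slide_max out) := by unfold Spec_make_per_slide_mappings_weekly_att; infer_instance

-- ===== CLAIM (what is proved, stated in full; the proofs are below) =====
def Claim_equal_make_per_slide_mappings_weekly_att : Prop := ∀ (header : List (String × String)) (rows : List (String × String × String × String)) (per_slide_max : Int), Dom_make_per_slide_mappings_weekly_att header rows per_slide_max → Pre_make_per_slide_mappings_weekly_att header rows per_slide_max → Spec_make_per_slide_mappings_weekly_att header rows per_slide_max (make_per_slide_mappings_weekly_att header rows per_slide_max)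

-- ===== LEMMAS AND PROOFS =====

-- the padded chunk B iterates over
def pvPadded (pack : List (String × String × String × String)) (n : Nat) : List (Option String × Option String × Option String × Option String) :=
  pack.map (fun r => ((some r.1 : Option String), (some r.2.1 : Option String), (some r.2.2.1 : Option String), (some r.2.2.2 : Option String)))
    ++ List.replicate (n - pack.length) ((none : Option String), (none : Option String), (none : Option String), (none : Option String))

theorem pvPadded_length (pack : List (String × String × String × String)) (n : Nat) (h : pack.length ≤ n) : (pvPadded pack n).length = n := by
  simp [pvPadded]; omega

-- A's indexed if/else fill equals B's fill of the padded chunk (generalized over the start index)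
theorem pvFill_eq_gen (pack : List (String × String × String × String)) (n : Nat) (h : pack.length ≤ n) :
    ∀ (k i : Nat) (m : PySem.Dict String (Option String)), i + k = n →
    (PySem.List.pyRange ((i : Int) + 1) ((n : Int) + 1) 1).foldl (fun m idx =>
        if idx ≤ (pack.length : Int) then
          match PySem.List.pyGet? pack (idx - 1) with
          | some (teacher, a, b, c) =>
              ((((m.insert ("teacher_" ++ PySem.Int.toStr idx) (some teacher)).insert
                  ("A" ++ PySem.Int.toStr idx) (some a)).insert
                  ("B" ++ PySem.Int.toStr idx) (some b)).insert
                  ("C" ++ PySem.Int.toStr idx) (some c))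
          | none => m
        else
          ((((m.insert ("teacher_" ++ PySem.Int.toStr idx) none).insert
              ("A" ++ PySem.Int.toStr idx) none).insert
              ("B" ++ PySem.Int.toStr idx) none).insert
              ("C" ++ PySem.Int.toStr idx) none)) m
      = pvFillB ((i : Int) + 1) ((pvPadded pack n).drop i) m := by
  intro k
  induction k with
  | zero =>
    intro i m hik
    have hi : i = n := by omega
    subst hi
    rw [PySem.List.pyRange_one_eq_nil (by omega), List.drop_eq_nil_of_le (le_of_eq (pvPadded_length pack i h))]
    rfl
  | succ k ih =>
    intro i m hik
    have hilt : i < n := by omega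
    have hpl : i < (pvPadded pack n).length := by rw [pvPadded_length pack n h]; omega
    rw [PySem.List.pyRange_one_cons (by exact_mod_cast (by omega : (i : Int) + 1 < (n : Int) + 1)),
        List.drop_eq_getElem_cons hpl]
    simp only [List.foldl_cons]
    by_cases hc : i < pack.length
    · have hget : PySem.List.pyGet? pack (((i : Int) + 1) - 1) = some pack[i] := by
        have : ((i : Int) + 1) - 1 = ((i : Nat) : Int) := by omega
        rw [this, PySem.List.pyGet?_natCast, List.getElem?_eq_getElem hc]
      have hpe : (pvPadded pack n)[i] = (some (pack[i].1), some (pack[i].2.1), some (pack[i].2.2.1), some (pack[i].2.2.2)) := by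
        simp [pvPadded, List.length_map, hc]
      rw [if_pos (by exact_mod_cast (by omega : (i : Int) + 1 ≤ (pack.length : Int))), hget, hpe]
      show _ = pvFillB (((i:Int)+1)+1) _ _
      have : ((i : Int) + 1) + 1 = ((i + 1 : Nat) : Int) + 1 := by push_cast; ring
      rw [this, ih (i + 1) _ (by omega)]
      rfl
    · have hpe : (pvPadded pack n)[i] = ((none : Option String), (none : Option String), (none : Option String), (none : Option String)) := by
        have hlen : (pack.map (fun r => ((some r.1 : Option String), (some r.2.1 : Option String), (some r.2.2.1 : Option String), (some r.2.2.2 : Option String)))).length ≤ i := by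
          simp; omega
        simp [pvPadded, List.getElem_append_right hlen]
      rw [if_neg (by omega), hpe]
      show _ = pvFillB (((i:Int)+1)+1) _ _
      have : ((i : Int) + 1) + 1 = ((i + 1 : Nat) : Int) + 1 := by push_cast; ring
      rw [this, ih (i + 1) _ (by omega)]

-- unfolding equation for pvChunksB on a nonempty list
theorem pvChunksB_cons {α : Type} (t : Nat) (x : α) (xs : List α) :
    pvChunksB t (x :: xs) = (x :: xs).take (t + 1) :: pvChunksB t ((x :: xs).drop (t + 1)) := by
  rw [pvChunksB]

-- closed form of B's chunking loop
theorem pvChunksB_closed_gen {α : Type} (t : Nat) : ∀ (N : Nat) (l : List α), l.length ≤ N →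
    pvChunksB t l = (List.range ((l.length + t) / (t + 1))).map (fun k => (l.drop ((t + 1) * k)).take (t + 1)) := by
  intro N
  induction N with
  | zero =>
    intro l hl
    have : l = [] := List.eq_nil_of_length_eq_zero (by omega)
    subst this
    simp [pvChunksB, Nat.div_eq_of_lt (Nat.lt_succ_self t)]
  | succ N ih =>
    intro l hl
    match l with
    | [] => simp [pvChunksB, Nat.div_eq_of_lt (Nat.lt_succ_self t)]
    | x :: xs =>
      have hn : (x :: xs).length = xs.length + 1 := by simp
      have hcount : ((x :: xs).length + t) / (t + 1) = xs.length / (t + 1) + 1 := by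
        rw [hn]
        have : xs.length + 1 + t = xs.length + (t + 1) := by omega
        rw [this, Nat.add_div_right _ (by omega)]
      have hl' : xs.length ≤ N := by rw [hn] at hl; omega
      have hdl : ((x :: xs).drop (t + 1)).length = xs.length - t := by
        rw [List.length_drop, hn]; omega
      have hrest : (((x :: xs).drop (t + 1)).length + t) / (t + 1) = xs.length / (t + 1) := by
        rw [hdl]
        rcases Nat.lt_or_ge xs.length t with hlt | hge
        · rw [(show xs.length - t + t = t by omega), Nat.div_eq_of_lt (show t < t + 1 by omega),
              Nat.div_eq_of_lt (show xs.length < t + 1 by omega)]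
        · rw [(show xs.length - t + t = xs.length by omega)]
      have hrec := ih ((x :: xs).drop (t + 1)) (by rw [hdl]; omega)
      rw [pvChunksB_cons, hrec, hrest, hcount, List.range_succ_eq_map, List.map_cons, List.map_map]
      refine List.cons_eq_cons.mpr ⟨?_, ?_⟩
      · simp
      · apply List.map_congr_left
        intro k _
        show List.take (t + 1) (List.drop ((t + 1) * k) (List.drop (t + 1) (x :: xs)))
            = List.take (t + 1) (List.drop ((t + 1) * (k + 1)) (x :: xs))
        rw [List.drop_drop]
        congr 2
        ring

theorem pvChunksB_closed {α : Type} (t : Nat) (l : List α) :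
    pvChunksB t l = (List.range ((l.length + t) / (t + 1))).map (fun k => (l.drop ((t + 1) * k)).take (t + 1)) :=
  pvChunksB_closed_gen t l.length l le_rfl

-- every chunk produced by B's loop has at most t+1 rows
theorem pvChunksB_len {α : Type} (t : Nat) (l : List α) :
    ∀ pack ∈ pvChunksB t l, pack.length ≤ t + 1 := by
  intro pack hp
  rw [pvChunksB_closed] at hp
  simp only [List.mem_map, List.mem_range] at hp
  obtain ⟨k, _, hk⟩ := hp
  subst hk
  simp

-- A's comprehension chunking equals the same closed form (positive size s = t+1)
theorem pvChunksA_closed (rows : List (String × String × String × String)) (s : Nat) (hs : 1 ≤ s) :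
    (PySem.List.pyRange 0 (rows.length : Int) (s : Int)).map
        (fun i => PySem.List.slice rows (some i) (some (i + (s : Int))))
      = (List.range ((rows.length + (s - 1)) / s)).map (fun k => (rows.drop (s * k)).take s) := by
  rw [PySem.List.pyRange_of_pos 0 (rows.length : Int) (s := (s : Int)) (by exact_mod_cast hs)]
  have hM : (if (0 : Int) < (rows.length : Int) then (((rows.length : Int) - 0 + (s : Int) - 1) / (s : Int)).toNat else 0)
      = (rows.length + (s - 1)) / s := by
    by_cases h0 : 0 < rows.length
    · rw [if_pos (by exact_mod_cast h0)]
      have h1 : ((rows.length : Int) - 0 + (s : Int) - 1) = ((rows.length + (s - 1) : Nat) : Int) := by push_cast; omega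
      rw [h1, ← Int.natCast_div, Int.toNat_natCast]
    · have h0' : rows.length = 0 := by omega
      rw [if_neg (by omega), h0', Nat.zero_add, Nat.div_eq_of_lt (by omega)]
  rw [hM, List.map_map]
  apply List.map_congr_left
  intro k _
  simp only [Function.comp]
  rw [(show (0 : Int) + (s : Int) * (k : Int) = ((s * k : Nat) : Int) by push_cast; ring),
      (show ((s * k : Nat) : Int) + (s : Int) = ((s * k + s : Nat) : Int) by push_cast; ring),
      PySem.List.slice_natCast]
  congr 1
  omega

-- ===== VERDICT (by name: the statement is the Claim_ definition above) =====
theorem make_per_slide_mappings_weekly_att_spec : Claim_equal_make_per_slide_mappings_weekly_att := by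
  intro header rows psm _ hpre
  unfold Spec_make_per_slide_mappings_weekly_att
  unfold Pre_make_per_slide_mappings_weekly_att at hpre
  unfold make_per_slide_mappings_weekly_att make_per_slide_mappings_weekly_att_alt
  by_cases hpos : 1 ≤ psm
  · -- positive size: chunk lists coincide, then each pack fills identically
    set s : Nat := psm.toNat with hsdef
    have hcast : psm = (s : Int) := by omega
    have hs1 : 1 ≤ s := by omega
    have hts : (psm - 1).toNat + 1 = s := by omega
    have hchunks :
        (PySem.List.pyRange 0 (rows.length : Int) psm).map
            (fun i => PySem.List.slice rows (some i) (some (i + psm)))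
          = pvChunksB (psm - 1).toNat rows := by
      rw [pvChunksB_closed, hcast, pvChunksA_closed rows s hs1,
          (show ((s : Int) - 1).toNat = s - 1 by omega), Nat.sub_add_cancel hs1]
    rw [if_pos hpos, hchunks]
    set packs := if pvChunksB (psm - 1).toNat rows = [] then [([] : List (String × String × String × String))] else pvChunksB (psm - 1).toNat rows with hpacks
    have hlen : ∀ pack ∈ packs, pack.length ≤ s := by
      intro pack hp
      rw [hpacks] at hp
      split at hp
      · simp at hp; subst hp; simp
      · have := pvChunksB_len (psm - 1).toNat rows pack hp
        omega
    rw [PySem.List.foldl_append_singleton_eq_map, PySem.List.foldl_append_singleton_eq_map]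
    simp only [List.nil_append]
    apply List.map_congr_left
    intro pack hp
    congr 1
    have hpl := hlen pack hp
    have hpad : (pack.map (fun r => ((some r.1 : Option String), (some r.2.1 : Option String), (some r.2.2.1 : Option String), (some r.2.2.2 : Option String)))
        ++ List.replicate (psm - (pack.length : Int)).toNat
            ((none : Option String), (none : Option String), (none : Option String), (none : Option String)))
        = pvPadded pack s := by
      unfold pvPadded
      congr 2
      omega
    rw [hpad]
    have := pvFill_eq_gen pack s hpl s 0 (PySem.Dict.ofList (header.map (fun p => (p.1, some p.2)))) (by omega)
    simpa [hcast] using this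
  · -- negative size: both produce the single all-None slide from the empty pack
    have hneg : psm < 0 := by omega
    have hA : PySem.List.pyRange 0 (rows.length : Int) psm = [] := by
      unfold PySem.List.pyRange
      rw [if_neg hpre]
      have h1 : ¬ (0 : Int) < psm := by omega
      have h2 : ¬ (rows.length : Int) < 0 := by omega
      simp [h1, h2]
    rw [hA, if_neg hpos]
    have hz : (psm - ((List.length ([] : List (String × String × String × String)) : Nat) : Int)).toNat = 0 := by
      simp; omega
    simp only [List.map_nil, reduceIte, List.foldl_cons, List.foldl_nil, List.nil_append, hz,
      List.replicate_zero, List.append_nil,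
      PySem.List.pyRange_one_eq_nil (show psm + 1 ≤ 1 by omega)]
    rfl
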